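-- pv_equiv track=rewrite | github.com/jovd83/restassured-skill | documentation/traceability-report/scripts/generate_html_reports.py | distribute_items
-- ===== SOURCE A (Python) =====
-- def distribute_items(items: list[str], row_count: int) -> list[list[str]]:
--     buckets = [[] for _ in range(max(row_count, 1))]
--     if not items:
--         return buckets
--     if row_count <= 1:
--         buckets[0] = items[:]
--         return buckets
--     if len(items) == row_count:
--         for index, item in enumerate(items):
--             buckets[index].append(item)
--         return buckets
--     if len(items) < row_count:
--         for index, item in enumerate(items):
--             buckets[index].append(item)
--         return buckets
--     for index, item in enumerate(items):
--         target = index if index < row_count - 1 else row_count - 1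
--         buckets[target].append(item)
--     return buckets
-- ===== SOURCE B (Python) =====
-- def distribute_items(items: list[str], row_count: int) -> list[list[str]]:
--     buckets = []
--     pos = 0
--     n = max(row_count, 1)
--     while n > 1:
--         buckets.append(items[pos:pos + 1])
--         pos += 1
--         n -= 1
--     buckets.append(items[pos:])
--     return buckets
-- ===== Notes on version B (the rewrite author's own statement) =====
-- stated objective: alternative
-- what changed: B loops over the bucket count with a moving cursor, emitting the one-item slice items[pos:pos+1] as each non-final bucket and the tail slice items[pos:] as the last bucket, replacing A's per-item enumerate/append loop with four length-based branches.
import Mathlib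
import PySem

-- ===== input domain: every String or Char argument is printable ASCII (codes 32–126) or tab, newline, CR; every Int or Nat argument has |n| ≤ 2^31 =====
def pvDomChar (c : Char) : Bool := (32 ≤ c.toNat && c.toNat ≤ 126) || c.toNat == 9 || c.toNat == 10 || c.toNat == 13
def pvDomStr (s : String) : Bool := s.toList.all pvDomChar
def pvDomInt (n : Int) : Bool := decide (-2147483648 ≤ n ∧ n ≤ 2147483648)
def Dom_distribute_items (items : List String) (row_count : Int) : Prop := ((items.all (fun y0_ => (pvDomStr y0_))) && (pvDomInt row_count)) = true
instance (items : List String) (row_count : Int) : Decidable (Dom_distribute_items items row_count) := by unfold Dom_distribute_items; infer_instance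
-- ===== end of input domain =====

-- B peels off one bucket per loop step over the bucket count (append the one-item slice
-- items[pos:pos+1] as a bucket, advance the cursor; the tail slice items[pos:] is the last
-- bucket) instead of A's per-item append loop with length-based branches; objective: alternative.

-- ===== PORT A =====
-- buckets[index].append(item): index is always a valid nonnegative index here, so `.toNat` is exact.
def distribute_items (items : List String) (row_count : Int) : List (List String) :=
  let buckets : List (List String) := (PySem.List.pyRange 0 (max row_count 1) 1).map (fun _ => [])
  if items = [] then buckets
  else if row_count ≤ 1 then buckets.set 0 items
  else if (items.length : Int) = row_count then
    (PySem.List.enumerate items).foldl (fun b p => b.modify p.1.toNat (fun l => l ++ [p.2])) buckets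
  else if (items.length : Int) < row_count then
    (PySem.List.enumerate items).foldl (fun b p => b.modify p.1.toNat (fun l => l ++ [p.2])) buckets
  else
    (PySem.List.enumerate items).foldl (fun b p =>
      let target : Int := if p.1 < row_count - 1 then p.1 else row_count - 1
      b.modify target.toNat (fun l => l ++ [p.2])) buckets

-- ===== PORT B =====
-- the while-loop of Source B as structural recursion on n (the loop runs while n > 1; n starts at
-- max(row_count,1) ≥ 1, so the Nat 0 case is unreachable). pos only ever grows, so it is a Nat.
def distLoop (items : List String) : List (List String) → Nat → Nat → List (List String)
  | buckets, pos, 0 => buckets ++ [PySem.List.slice items (some (pos:Int)) none]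
  | buckets, pos, 1 => buckets ++ [PySem.List.slice items (some (pos:Int)) none]
  | buckets, pos, n+2 =>
      distLoop items (buckets ++ [PySem.List.slice items (some (pos:Int)) (some ((pos:Int)+1))]) (pos+1) (n+1)

def distribute_items_alt (items : List String) (row_count : Int) : List (List String) :=
  distLoop items [] 0 (max row_count 1).toNat

-- ===== PRECONDITION & SPEC =====
def Spec_distribute_items (items : List String) (row_count : Int) (out : List (List String)) : Prop := out = distribute_items_alt items row_count
instance (items : List String) (row_count : Int) (out : List (List String)) : Decidable (Spec_distribute_items items row_count out) := by unfold Spec_distribute_items; infer_instance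

-- ===== CLAIM (what is proved, stated in full; the proofs are below) =====
def Claim_equal_distribute_items : Prop := ∀ (items : List String) (row_count : Int), Dom_distribute_items items row_count → Spec_distribute_items items row_count (distribute_items items row_count)

-- ===== LEMMAS AND PROOFS =====

-- A's append loop, bucket by bucket: after folding, bucket i holds its old contents followed by
-- the items whose target bucket is i.
theorem foldl_modify_get? (items : List String) (s : Int) (t : Int → Nat)
    (b : List (List String)) (i : Nat) :
    ((PySem.List.enumerate items s).foldl (fun acc p => acc.modify (t p.1) (fun l => l ++ [p.2])) b)[i]?
    = b[i]?.map (fun bi => bi ++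
        (PySem.List.enumerate items s).filterMap (fun p => if t p.1 = i then some p.2 else none)) := by
  induction items generalizing s b with
  | nil => simp [PySem.List.enumerate_nil]
  | cons x xs ih =>
    rw [PySem.List.enumerate_cons]
    simp only [List.foldl_cons, List.filterMap_cons, ih, List.getElem?_modify]
    by_cases h : t s = i
    · simp [h]
      cases b[i]? <;> simp
    · simp [h]

theorem buckets_eq (n : Int) :
    ((PySem.List.pyRange 0 n 1).map (fun _ => ([] : List String))) = List.replicate n.toNat [] := by
  rw [PySem.List.pyRange_one]
  simp [Function.comp_def, List.map_const']

-- proof-side view of B's loop: the cons-building recursion it accumulates.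
def distGo : List String → Nat → List (List String)
  | rest, 0 => [rest]
  | rest, 1 => [rest]
  | rest, n+2 => PySem.List.slice rest none (some 1) :: distGo (PySem.List.slice rest (some 1) none) (n+1)

theorem distLoop_eq_distGo (items : List String) (buckets : List (List String)) (pos n : Nat) :
    distLoop items buckets pos n = buckets ++ distGo (items.drop pos) n := by
  induction n using Nat.strong_induction_on generalizing buckets pos with
  | _ n ih =>
    match n with
    | 0 => rw [distLoop, distGo, PySem.List.slice_from_natCast]
    | 1 => rw [distLoop, distGo, PySem.List.slice_from_natCast]
    | n+2 =>
      have h1 : PySem.List.slice items (some (pos:Int)) (some ((pos:Int)+1)) =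
          (items.drop pos).take 1 := by
        simpa using PySem.List.slice_natCast_add items pos 1
      have h2 : PySem.List.slice (items.drop pos) none (some 1) = (items.drop pos).take 1 := by
        simpa using PySem.List.slice_to_natCast (items.drop pos) 1
      have h3 : PySem.List.slice (items.drop pos) (some 1) none = items.drop (pos+1) := by
        rw [PySem.List.slice_from_one, List.tail_drop]
      rw [distLoop, distGo, ih (n+1) (by omega), h1, h2, h3, List.append_assoc]
      rfl

-- B's recursion, bucket by bucket.
theorem distGo_get (rest : List String) (m i : Nat) :
    (distGo rest (m+1))[i]? =
      if i < m then some ((rest.drop i).take 1)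
      else if i = m then some (rest.drop m) else none := by
  induction m generalizing rest i with
  | zero =>
    cases i <;> simp [distGo]
  | succ m ih =>
    have h1 : PySem.List.slice rest none (some 1) = rest.take 1 := by
      simpa using PySem.List.slice_to_natCast rest 1
    have h2 : PySem.List.slice rest (some 1) none = rest.drop 1 := by
      rw [PySem.List.slice_from_one]; exact (List.drop_one).symm
    show (PySem.List.slice rest none (some 1) :: distGo (PySem.List.slice rest (some 1) none) (m+1))[i]? = _
    rw [h1, h2]
    cases i with
    | zero => simp
    | succ j =>
      simp only [List.getElem?_cons_succ, ih]
      have hd : ∀ k : Nat, (rest.drop 1).drop k = rest.drop (k+1) := by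
        intro k; rw [List.drop_drop]; ring_nf
      by_cases hj : j < m
      · simp [hj, Nat.succ_lt_succ hj, hd]
      · by_cases hjm : j = m
        · subst hjm; simp [hd]
        · simp [hj, hjm, show ¬ j + 1 < m + 1 by omega, show ¬ j + 1 = m + 1 by omega]

theorem take_one_drop (items : List String) (i : Nat) :
    (items.drop i).take 1 = if (i:Int) < (items.length:Int) then [items.getD i ""] else [] := by
  by_cases h : i < items.length
  · have h' : (i:Int) < (items.length:Int) := by exact_mod_cast h
    rw [if_pos h', List.drop_eq_getElem_cons h, List.take_succ_cons, List.take_zero,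
      List.getD_eq_getElem?_getD, List.getElem?_eq_getElem h, Option.getD_some]
  · have h' : ¬ (i:Int) < (items.length:Int) := by simpa using Nat.le_of_not_lt h
    rw [List.drop_eq_nil_of_le (Nat.le_of_not_lt h)]
    simp [h']

theorem alt_get (items : List String) (m i : Nat) :
    (distribute_items_alt items ((m:Int)+1))[i]? =
      if i < m then some (if (i:Int) < (items.length:Int) then [items.getD i ""] else [])
      else if i = m then some (items.drop m) else none := by
  have htn : (max ((m:Int)+1) 1).toNat = m + 1 := by omega
  rw [distribute_items_alt, htn, distLoop_eq_distGo, List.nil_append, List.drop_zero, distGo_get, take_one_drop]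

theorem drop_last_toList {α : Type} (l : List α) (i : Nat) (h : l.length ≤ i + 1) :
    l.drop i = l[i]?.toList := by
  by_cases hi : i < l.length
  · rw [List.drop_eq_getElem_cons hi, List.drop_eq_nil_of_le (by omega)]
    simp [List.getElem?_eq_getElem hi]
  · rw [List.drop_eq_nil_of_le (by omega), List.getElem?_eq_none (by omega)]
    rfl

theorem filt_id (items : List String) (s i : Nat) :
    (PySem.List.enumerate items (s:Int)).filterMap
      (fun p => if p.1.toNat = i then some p.2 else none)
    = if i < s then [] else (items[i-s]?).toList := by
  induction items generalizing s with
  | nil => simp [PySem.List.enumerate_nil]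
  | cons x xs ih =>
    rw [PySem.List.enumerate_cons]
    have h1 : (s:Int) + 1 = ((s+1 : Nat) : Int) := by push_cast; ring
    simp only [List.filterMap_cons, Int.toNat_natCast, h1, ih]
    by_cases h : s = i
    · subst h
      simp
    · by_cases h2 : i < s
      · simp [h, h2, Nat.lt_succ_of_lt h2]
      · have h3 : ¬ i < s + 1 := by omega
        have h4 : i - s = (i - (s+1)) + 1 := by omega
        simp [h, h2, h3, h4]

theorem filt_clamp (items : List String) (m : Nat) (s i : Nat) :
    (PySem.List.enumerate items (s:Int)).filterMap
      (fun p => if (if p.1 < (m:Int) then p.1 else (m:Int)).toNat = i then some p.2 else none)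
    = if i < m then (if i < s then [] else (items[i-s]?).toList)
      else if i = m then items.drop (m - s)
      else [] := by
  induction items generalizing s with
  | nil =>
    simp only [PySem.List.enumerate_nil, List.filterMap_nil]
    split <;> [skip; split] <;> simp
  | cons x xs ih =>
    rw [PySem.List.enumerate_cons]
    have h1 : (s:Int) + 1 = ((s+1 : Nat) : Int) := by push_cast; ring
    simp only [List.filterMap_cons, h1, ih]
    by_cases hs : s < m
    · have hc : ((s:Int) < (m:Int)) := by exact_mod_cast hs
      simp only [hc, if_pos, Int.toNat_natCast]
      by_cases h : s = i
      · subst h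
        simp [hs]
      · by_cases hi : i < m
        · by_cases h2 : i < s
          · simp [h, hi, h2, Nat.lt_succ_of_lt h2]
          · have h3 : ¬ i < s + 1 := by omega
            have h4 : i - s = (i - (s+1)) + 1 := by omega
            simp [h, hi, h2, h3, h4]
        · by_cases him : i = m
          · have h5 : m - s = (m - (s+1)) + 1 := by omega
            have hsm : ¬ s = m := by omega
            simp [him, h5, hsm]
          · simp [h, hi, him]
    · have hc : ¬ ((s:Int) < (m:Int)) := by exact_mod_cast hs
      simp only [hc, if_neg, not_false_iff, Int.toNat_natCast]
      by_cases him : m = i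
      · subst him
        have h7 : m - s = 0 := by omega
        have h8 : m - (s+1) = 0 := by omega
        simp [h7, h8]
      · have hm2 : ¬ i = m := by omega
        by_cases hi : i < m
        · have hi1 : i < s := by omega
          have hi2 : i < s + 1 := by omega
          simp [him, hi, hi1, hi2]
        · simp [him, hi, hm2]

theorem main_eq (items : List String) (rc : Int) :
    distribute_items items rc = distribute_items_alt items rc := by
  by_cases hrc : rc ≤ 1
  · have hmax : max rc 1 = 1 := by omega
    have hr : PySem.List.pyRange 0 1 1 = [0] := by decide
    have halt : distribute_items_alt items rc = [items] := by
      rw [distribute_items_alt, hmax, distLoop_eq_distGo]; simp [distGo]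
    rw [halt]
    by_cases hnil : items = []
    · subst hnil
      simp [distribute_items, hmax, hr]
    · simp [distribute_items, hmax, hr, hrc, hnil]
  · -- rc ≥ 2; write rc = m + 1 with 1 ≤ m
    obtain ⟨m, hm1, hmeq⟩ : ∃ m : Nat, 1 ≤ m ∧ rc = (m:Int) + 1 :=
      ⟨(rc - 1).toNat, by omega, by omega⟩
    subst hmeq
    have hmax : max ((m:Int)+1) 1 = (m:Int)+1 := by omega
    have hle : ¬ ((m:Int)+1 ≤ 1) := by omega
    have hsub : (m:Int)+1-1 = (m:Int) := by ring
    have htn : ((m:Int)+1).toNat = m + 1 := by omega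
    apply List.ext_getElem?
    intro i
    rw [alt_get items m i]
    by_cases hnil : items = []
    · have hA : distribute_items items ((m:Int)+1)
          = List.replicate (m+1) ([] : List String) := by
        simp only [distribute_items, hmax, if_pos hnil]
        rw [buckets_eq, htn]
      rw [hA, List.getElem?_replicate]
      subst hnil
      by_cases hi : i < m
      · have : (i:Int) < (0:Int) ↔ False := by simp
        simp [hi, Nat.lt_succ_of_lt hi]
      · by_cases him : i = m
        · simp [him]
        · simp [hi, him, show ¬ i < m + 1 by omega]
    · by_cases hlen : (items.length : Int) ≤ (m:Int) + 1
      · -- len(items) ≤ row_count: the identity-target loop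
        have hA : distribute_items items ((m:Int)+1)
            = (PySem.List.enumerate items).foldl
                (fun b p => b.modify p.1.toNat (fun l => l ++ [p.2]))
                ((PySem.List.pyRange 0 ((m:Int)+1) 1).map (fun _ => [])) := by
          simp only [distribute_items, hmax, if_neg hnil]
          split_ifs with h1 h2 <;> first | rfl | omega
        rw [hA, foldl_modify_get? items 0 (fun z => z.toNat)]
        have hf := filt_id items 0 i
        rw [show ((0:Nat):Int) = (0:Int) by simp] at hf
        rw [hf, buckets_eq, htn, List.getElem?_replicate]
        by_cases hi : i < m
        · have hi1 : i < m + 1 := by omega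
          by_cases hiL : i < items.length
          · have hiL' : (i:Int) < (items.length:Int) := by exact_mod_cast hiL
            simp [hi, hi1, hiL', List.getD_eq_getElem?_getD,
              List.getElem?_eq_getElem hiL]
          · have hiL' : ¬ (i:Int) < (items.length:Int) := by
              simpa using Nat.le_of_not_lt hiL
            simp [hi, hi1, List.getElem?_eq_none (Nat.le_of_not_lt hiL), hiL']
        · by_cases him : i = m
          · subst him
            have hL : items.length ≤ i + 1 := by omega
            simp [drop_last_toList items i hL]
          · simp [hi, him, show ¬ i < m + 1 by omega]
      · -- len(items) > row_count: the clamped-target loop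
        have hA : distribute_items items ((m:Int)+1)
            = (PySem.List.enumerate items).foldl
                (fun b p => b.modify (if p.1 < (m:Int) then p.1 else (m:Int)).toNat
                  (fun l => l ++ [p.2]))
                ((PySem.List.pyRange 0 ((m:Int)+1) 1).map (fun _ => [])) := by
          simp only [distribute_items, hmax, if_neg hnil, hsub]
          split_ifs with h1 h2 <;> first | rfl | omega
        rw [hA, foldl_modify_get? items 0 (fun z => (if z < (m:Int) then z else (m:Int)).toNat)]
        have hf := filt_clamp items m 0 i
        rw [show ((0:Nat):Int) = (0:Int) by simp] at hf
        rw [hf, buckets_eq, htn, List.getElem?_replicate]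
        by_cases hi : i < m
        · have hiL : i < items.length := by omega
          have hiL' : (i:Int) < (items.length:Int) := by exact_mod_cast hiL
          simp [hi, show i < m + 1 by omega, List.getElem?_eq_getElem hiL, hiL',
            List.getD_eq_getElem?_getD]
        · by_cases him : i = m
          · subst him
            simp
          · simp [hi, him, show ¬ i < m + 1 by omega]

-- ===== VERDICT (by name: the statement is the Claim_ definition above) =====

theorem distribute_items_spec : Claim_equal_distribute_items := by
  intro items rc _
  unfold Spec_distribute_items
  exact main_eq items rc
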